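-- pv_equiv track=rewrite | github.com/Concyclics/MemForest | src/api/client.py | _find_json_string_end
-- ===== SOURCE A (Python) =====
-- def _find_json_string_end(s: str) -> int:
--     """Return index of the closing unescaped double-quote in a JSON string body."""
--     i = 0
--     while i < len(s):
--         if s[i] == "\\" and i + 1 < len(s):
--             i += 2  # skip escape sequence
--         elif s[i] == '"':
--             return i
--         else:
--             i += 1
--     return -1  # not found (truncated)
-- ===== SOURCE B (Python) =====
-- import re
--
-- _BODY = re.compile(r'(?:\\[\s\S]|[^"\\])*')
--
-- def _find_json_string_end(s: str) -> int:
--     """Return index of the closing unescaped double-quote in a JSON string body."""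
--     e = _BODY.match(s).end()
--     return e if e < len(s) and s[e] == '"' else -1
-- ===== Notes on version B (the rewrite author's own statement) =====
-- stated objective: idiomatic
-- what changed: Replaced the explicit index while-loop with a single regex scan: re.match(r'(?:\\[\s\S]|[^"\\])*', s) greedily consumes escape pairs and ordinary characters, then the closing quote is checked at the match end.
import Mathlib
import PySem

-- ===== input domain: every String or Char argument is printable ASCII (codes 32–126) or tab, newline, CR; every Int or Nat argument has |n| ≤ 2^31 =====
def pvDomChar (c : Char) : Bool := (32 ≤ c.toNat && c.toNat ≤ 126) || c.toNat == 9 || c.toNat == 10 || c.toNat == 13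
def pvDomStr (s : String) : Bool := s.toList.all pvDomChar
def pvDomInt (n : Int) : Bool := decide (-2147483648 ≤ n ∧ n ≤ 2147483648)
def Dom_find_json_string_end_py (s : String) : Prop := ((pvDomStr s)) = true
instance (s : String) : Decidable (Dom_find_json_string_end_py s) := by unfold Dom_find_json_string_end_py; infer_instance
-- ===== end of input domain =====

-- B replaces A's index while-loop by one greedy regex scan for the string body; objective: idiomatic, same cost.

-- ===== PORT A =====
-- A's while-loop over index i, transcribed as recursion on the unread suffix
-- (i < len(s) ↔ suffix nonempty, s[i] = head, i+1 < len(s) ↔ tail nonempty).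
def pvALoop : List Char → Int → Int
  | [], _ => -1
  | c :: rest, i =>
    if c = '\\' ∧ rest ≠ [] then pvALoop rest.tail (i + 2)   -- skip escape sequence
    else if c = '"' then i
    else pvALoop rest (i + 1)
termination_by cs _ => cs.length
decreasing_by all_goals simp_all

def find_json_string_end_py (s : String) : Int := pvALoop s.toList 0

-- ===== PORT B =====
-- Hand port of the regex r'(?:\\[\s\S]|[^"\\])*' : the greedy match length from the
-- start of cs; exact because the regex is deterministic here — alternative 1 eats a
-- backslash plus ANY one char (so a lone trailing backslash stays unconsumed),
-- alternative 2 eats one char that is neither '"' nor '\'.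
def pvBodyMatchLen : List Char → Nat
  | '\\' :: _ :: rest => 2 + pvBodyMatchLen rest
  | c :: rest => if c = '"' ∨ c = '\\' then 0 else 1 + pvBodyMatchLen rest
  | [] => 0

def find_json_string_end_py_alt (s : String) : Int :=
  let cs := s.toList
  let e := pvBodyMatchLen cs
  if e < cs.length ∧ cs[e]? = some '"' then (e : Int) else -1

-- ===== PRECONDITION & SPEC =====
def Spec_find_json_string_end_py (s : String) (out : Int) : Prop := out = find_json_string_end_py_alt s
instance (s : String) (out : Int) : Decidable (Spec_find_json_string_end_py s out) := by unfold Spec_find_json_string_end_py; infer_instance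

-- ===== CLAIM (what is proved, stated in full; the proofs are below) =====
def Claim_equal_find_json_string_end_py : Prop := ∀ (s : String), Dom_find_json_string_end_py s → Spec_find_json_string_end_py s (find_json_string_end_py s)

-- ===== LEMMAS AND PROOFS =====

-- unfolding equation for pvBodyMatchLen when the head is not a backslash
theorem pvBodyMatchLen_cons_ne (c : Char) (rest : List Char) (hb : c ≠ '\\') :
    pvBodyMatchLen (c :: rest) = if c = '"' ∨ c = '\\' then 0 else 1 + pvBodyMatchLen rest := by
  rw [pvBodyMatchLen.eq_def]
  split <;> simp_all

-- A's loop from offset i equals "i + match end" when an unescaped quote follows the body, else -1.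
theorem pvALoop_eq (cs : List Char) (i : Int) :
    pvALoop cs i =
      (if pvBodyMatchLen cs < cs.length ∧ cs[pvBodyMatchLen cs]? = some '"'
       then i + (pvBodyMatchLen cs : Int) else -1) := by
  induction cs, i using pvALoop.induct with
  | case1 i => simp [pvALoop, pvBodyMatchLen]
  | case2 c rest i h ih =>
    obtain ⟨hc, hrest⟩ := h
    obtain ⟨d, rest', rfl⟩ : ∃ d rest', rest = d :: rest' := by
      cases rest with
      | nil => exact absurd rfl hrest
      | cons d rest' => exact ⟨d, rest', rfl⟩
    subst hc
    rw [pvALoop, if_pos ⟨rfl, hrest⟩]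
    simp only [List.tail_cons] at ih ⊢
    rw [ih]
    simp only [pvBodyMatchLen, List.length_cons]
    by_cases hlt : pvBodyMatchLen rest' < rest'.length ∧ rest'[pvBodyMatchLen rest']? = some '"'
    · rw [if_pos hlt, if_pos]
      · push_cast; ring
      · refine ⟨by omega, ?_⟩
        have he : 2 + pvBodyMatchLen rest' = pvBodyMatchLen rest' + 1 + 1 := by omega
        simp [he, hlt.2]
    · rw [if_neg hlt, if_neg]
      intro ⟨h1, h2⟩
      apply hlt
      have he : 2 + pvBodyMatchLen rest' = pvBodyMatchLen rest' + 1 + 1 := by omega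
      rw [he] at h2
      simp at h2
      exact ⟨by omega, h2⟩
  | case3 rest i h =>
    rw [pvALoop, if_neg h, if_pos rfl]
    have hml : pvBodyMatchLen ('"' :: rest) = 0 := by
      rw [pvBodyMatchLen_cons_ne _ _ (by decide)]
      simp
    simp [hml]
  | case4 c rest i h hq ih =>
    rw [pvALoop, if_neg h, if_neg hq, ih]
    by_cases hb : c = '\\'
    · -- then rest = [] (from the negated loop guard)
      have hrest : rest = [] := by
        by_contra hne
        exact h ⟨hb, hne⟩
      subst hb hrest
      simp [pvBodyMatchLen]
    · have hml : pvBodyMatchLen (c :: rest) = 1 + pvBodyMatchLen rest := by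
        rw [pvBodyMatchLen_cons_ne _ _ hb]
        simp [hq, hb]
      rw [hml]
      simp only [List.length_cons]
      by_cases hlt : pvBodyMatchLen rest < rest.length ∧ rest[pvBodyMatchLen rest]? = some '"'
      · rw [if_pos hlt, if_pos]
        · push_cast; ring
        · refine ⟨by omega, ?_⟩
          have he : 1 + pvBodyMatchLen rest = pvBodyMatchLen rest + 1 := by omega
          simp [he, hlt.2]
      · rw [if_neg hlt, if_neg]
        intro ⟨h1, h2⟩
        apply hlt
        have he : 1 + pvBodyMatchLen rest = pvBodyMatchLen rest + 1 := by omega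
        rw [he] at h2
        simp at h2
        exact ⟨by omega, h2⟩

-- ===== VERDICT (by name: the statement is the Claim_ definition above) =====
theorem find_json_string_end_py_spec : Claim_equal_find_json_string_end_py := by
  intro s _
  unfold Spec_find_json_string_end_py find_json_string_end_py find_json_string_end_py_alt
  rw [pvALoop_eq]
  simp
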